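-- pv_equiv track=rewrite | github.com/wanibisen3/cv-webapp | cv_engine.py | _is_section_reset
-- ===== SOURCE A (Python) =====
-- _SECTION_RESETS = frozenset({
--     # Experience headings — pure containers: individual company rows come after
--     "experience", "work experience", "professional experience",
--     "relevant experience", "internship experience",
--     # Education headings — pure containers: institution rows come after
--     "education", "academic background", "academic qualifications",
--     "educational background", "academic history",
--     # Project headings — pure containers: project rows come after
--     "side project", "side projects", "projects", "personal projects",
--     "academic projects", "selected projects",
--     # Skills headings — filled server-side from skills_text, never as bullets
--     "skills", "skills & additional information",
--     "skills &amp; additional information",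
--     "core competencies", "technical skills", "key skills",
--     "tools & technologies",
--     # Certifications — special-cased via _CERTIFICATIONS_HEADINGS (handled before
--     # _is_section_reset); kept here for robustness when no dedicated cert key path.
--     "certifications", "certificates", "licenses & certifications",
--     "professional certifications",
--     # Profile / summary — not bullet sections
--     "summary", "profile", "professional summary", "executive summary",
--     "career summary", "objective", "career objective",
--     # Non-bullet trailing blocks
--     "interests", "hobbies", "references",
--     # NOTE: "awards", "achievements", "publications", "research",
--     # "presentations", "languages", "leadership", "leadership experience",
--     # "volunteer", "volunteering", "community involvement", "extracurricular",
--     # "extracurricular activities", "honors & awards" were intentionally REMOVED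
--     # from this set. Those are typically SELF-CONTAINED bullet sections (the
--     # heading *is* the section) and should be captured as cur_title so their
--     # bullets are counted / tailored, not discarded. They remain matchable as
--     # anchors via `_build_anchors` (humanised section_key / template_anchor).
-- })
--
-- def _is_section_reset(text_lower: str) -> bool:
--     """
--     True if `text_lower` (already lowercased, stripped) is a recognised
--     section heading that should end the current section-of-interest.
--
--     Uses prefix matching so variants like "volunteer experience",
--     "leadership experience", "extracurricular activities", and
--     "community involvement" all match correctly — the original exact-set
--     check missed these.
--     """
--     if not text_lower:
--         return False
--     if text_lower in _SECTION_RESETS: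
--         return True
--     if text_lower.rstrip("s") in _SECTION_RESETS:
--         return True
--     if len(text_lower) > 60:
--         return False   # body-of-text, not a heading
--     for reset in _SECTION_RESETS:
--         # Word-boundary prefix match: "volunteer experience" starts with "volunteer "
--         if text_lower.startswith(reset + " "):
--             return True
--     return False
-- ===== SOURCE B (Python) =====
-- _SECTION_RESETS = frozenset(
--     "experience|work experience|professional experience|"
--     "relevant experience|internship experience|"
--     "education|academic background|academic qualifications|"
--     "educational background|academic history|"
--     "side project|side projects|projects|personal projects|"
--     "academic projects|selected projects|"
--     "skills|skills & additional information|"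
--     "skills &amp; additional information|"
--     "core competencies|technical skills|key skills|"
--     "tools & technologies|"
--     "certifications|certificates|licenses & certifications|"
--     "professional certifications|"
--     "summary|profile|professional summary|executive summary|"
--     "career summary|objective|career objective|"
--     "interests|hobbies|references".split("|")
-- )
--
--
-- def _is_section_reset(text_lower: str) -> bool:
--     # Different decomposition: instead of scanning the reset set and testing
--     # startswith(reset + " ") for each entry, walk the text once, growing the
--     # current word-boundary prefix, and test that prefix at every space.
--     if not text_lower:
--         return False
--     if text_lower in _SECTION_RESETS:
--         return True
--     if text_lower.rstrip("s") in _SECTION_RESETS: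
--         return True
--     if len(text_lower) > 60:
--         return False
--     prefix = []
--     for ch in text_lower:
--         if ch == " " and "".join(prefix) in _SECTION_RESETS:
--             return True
--         prefix.append(ch)
--     return False
-- ===== Notes on version B (the rewrite author's own statement) =====
-- stated objective: alternative
-- what changed: A scans the reset set and tests startswith(reset+' ') for each entry; B walks the text once with a growing prefix accumulator and tests that prefix for set membership at every space position.
import Mathlib
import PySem

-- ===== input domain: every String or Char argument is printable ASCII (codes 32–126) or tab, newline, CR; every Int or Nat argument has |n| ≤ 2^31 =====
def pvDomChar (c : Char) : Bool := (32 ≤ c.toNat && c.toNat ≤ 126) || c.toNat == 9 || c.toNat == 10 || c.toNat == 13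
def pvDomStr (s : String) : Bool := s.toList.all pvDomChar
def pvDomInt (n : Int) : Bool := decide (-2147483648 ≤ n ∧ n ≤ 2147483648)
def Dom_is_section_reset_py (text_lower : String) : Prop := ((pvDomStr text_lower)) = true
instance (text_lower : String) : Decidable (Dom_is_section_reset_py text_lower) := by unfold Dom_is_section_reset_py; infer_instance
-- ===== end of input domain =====

-- B replaces A's scan over the reset set (startswith reset+" ") by one left-to-right
-- walk of the text with a growing prefix accumulator tested at each space; same cost class.

-- exact hand port of str.rstrip("s") (single strip character): drop all trailing 's'
def rstripS (t : String) : String :=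
  String.ofList ((t.toList.reverse.dropWhile (fun c => c == 's')).reverse)

-- ===== PORT A =====
-- _SECTION_RESETS as A writes it (frozenset of distinct literals; membership only, so a list is exact)
def sectionResets : List String :=
  ["experience", "work experience", "professional experience",
   "relevant experience", "internship experience",
   "education", "academic background", "academic qualifications",
   "educational background", "academic history",
   "side project", "side projects", "projects", "personal projects",
   "academic projects", "selected projects",
   "skills", "skills & additional information",
   "skills &amp; additional information",
   "core competencies", "technical skills", "key skills",
   "tools & technologies",
   "certifications", "certificates", "licenses & certifications",
   "professional certifications",
   "summary", "profile", "professional summary", "executive summary",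
   "career summary", "objective", "career objective",
   "interests", "hobbies", "references"]

def is_section_reset_py (text_lower : String) : Bool :=
  if text_lower == "" then false
  else if sectionResets.contains text_lower then true
  else if sectionResets.contains (rstripS text_lower) then true
  else if PySem.Str.len text_lower > 60 then false
  else sectionResets.any (fun reset => PySem.Str.startswith text_lower (reset ++ " "))

-- ===== PORT B =====
-- Source B builds the same set by splitting one '|'-separated blob
def resetsBlob : String :=
  "experience|work experience|professional experience|relevant experience|internship experience|education|academic background|academic qualifications|educational background|academic history|side project|side projects|projects|personal projects|academic projects|selected projects|skills|skills & additional information|skills &amp; additional information|core competencies|technical skills|key skills|tools & technologies|certifications|certificates|licenses & certifications|professional certifications|summary|profile|professional summary|executive summary|career summary|objective|career objective|interests|hobbies|references"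

def sectionResetsB : List String := (PySem.Str.split? resetsBlob "|").getD []

-- the for-loop of Source B: grow `prefix`, test '"".join(prefix)' at each space, early return
def scanPrefix (pre : List Char) : List Char → Bool
  | [] => false
  | c :: rest =>
      if c == ' ' && sectionResetsB.contains (PySem.Str.join "" (pre.map (fun d => String.ofList [d]))) then
        true
      else
        scanPrefix (pre ++ [c]) rest

def is_section_reset_py_alt (text_lower : String) : Bool :=
  if text_lower == "" then false
  else if sectionResetsB.contains text_lower then true
  else if sectionResetsB.contains (rstripS text_lower) then true
  else if PySem.Str.len text_lower > 60 then false
  else scanPrefix [] text_lower.toList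

-- ===== PRECONDITION & SPEC =====
def Spec_is_section_reset_py (text_lower : String) (out : Bool) : Prop := out = is_section_reset_py_alt text_lower
instance (text_lower : String) (out : Bool) : Decidable (Spec_is_section_reset_py text_lower out) := by unfold Spec_is_section_reset_py; infer_instance

-- ===== CLAIM (what is proved, stated in full; the proofs are below) =====
def Claim_equal_is_section_reset_py : Prop := ∀ (text_lower : String), Dom_is_section_reset_py text_lower → Spec_is_section_reset_py text_lower (is_section_reset_py text_lower)

-- ===== LEMMAS AND PROOFS =====

set_option maxRecDepth 40000 in
set_option maxHeartbeats 2000000 in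
theorem setsB_eq : sectionResetsB = sectionResets := by decide

theorem join_singletons (pre : List Char) :
    PySem.Str.join "" (pre.map (fun d => String.ofList [d])) = String.ofList pre := by
  apply String.toList_inj.mp
  simp only [PySem.Str.toList_join, List.map_map, String.toList_ofList]
  rw [show (String.toList ∘ fun d => String.ofList [d]) = fun d => ([d] : List Char) from
    funext (fun d => by simp)]
  exact PySem.Chars.join_nil_singletons pre

-- the prefix walk finds exactly the space positions whose prefix is in the set
theorem scanPrefix_iff (pre : List Char) (cs : List Char) :
    scanPrefix pre cs = true ↔
      ∃ k, ∃ h : k < cs.length, cs[k] = ' ' ∧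
        sectionResets.contains (String.ofList (pre ++ cs.take k)) = true := by
  induction cs generalizing pre with
  | nil => simp [scanPrefix]
  | cons c rest ih =>
    rw [scanPrefix]
    by_cases hhit : (c == ' ' && sectionResetsB.contains
        (PySem.Str.join "" (pre.map (fun d => String.ofList [d])))) = true
    · rw [if_pos hhit]
      rw [Bool.and_eq_true, beq_iff_eq] at hhit
      rw [join_singletons, setsB_eq] at hhit
      simp only [true_iff]
      exact ⟨0, by simp, by simpa using hhit.1, by simpa using hhit.2⟩
    · rw [if_neg hhit, ih]
      constructor
      · rintro ⟨k, hk, hsp, hmem⟩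
        exact ⟨k + 1, by simpa using hk, by simpa using hsp, by simpa using hmem⟩
      · rintro ⟨k, hk, hsp, hmem⟩
        cases k with
        | zero =>
          exfalso
          apply hhit
          rw [Bool.and_eq_true, beq_iff_eq, join_singletons, setsB_eq]
          exact ⟨by simpa using hsp, by simpa using hmem⟩
        | succ k =>
          exact ⟨k, by simpa using hk, by simpa using hsp, by simpa using hmem⟩

-- A's startswith scan over the set finds exactly the same positions
theorem any_startswith_iff (t : String) :
    (sectionResets.any fun reset => PySem.Str.startswith t (reset ++ " ")) = true ↔
      ∃ k, ∃ h : k < t.toList.length, t.toList[k] = ' ' ∧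
        sectionResets.contains (String.ofList (t.toList.take k)) = true := by
  rw [List.any_eq_true]
  constructor
  · rintro ⟨r, hr, hsw⟩
    rw [PySem.Str.startswith_eq, PySem.Chars.startswith_iff] at hsw
    have htl : (r ++ " ").toList = r.toList ++ [' '] := by simp
    rw [htl] at hsw
    have hk : r.toList.length < t.toList.length := by
      have := hsw.length_le
      simp only [List.length_append, List.length_cons, List.length_nil] at this
      omega
    have htake : t.toList.take r.toList.length = r.toList :=
      (List.prefix_iff_eq_take.mp ((List.prefix_append r.toList [' ']).trans hsw)).symm
    obtain ⟨rest, hrest⟩ := hsw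
    have hrest' : r.toList ++ (' ' :: rest) = t.toList := by simpa using hrest
    have hget? : t.toList[r.toList.length]? = some ' ' := by
      rw [← hrest', List.getElem?_append_right (le_refl _)]
      simp
    refine ⟨r.toList.length, hk, ?_, ?_⟩
    · rw [List.getElem?_eq_getElem hk] at hget?
      exact Option.some.inj hget?
    · rw [htake]
      simp [hr]
  · rintro ⟨k, hk, hsp, hmem⟩
    refine ⟨String.ofList (t.toList.take k), by simpa using hmem, ?_⟩
    rw [PySem.Str.startswith_eq, PySem.Chars.startswith_iff]
    have htl : (String.ofList (t.toList.take k) ++ " ").toList = t.toList.take (k + 1) := by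
      rw [List.take_add_one]
      simp [List.getElem?_eq_getElem hk, hsp]
    rw [htl]
    exact List.take_prefix _ _

-- ===== VERDICT (by name: the statement is the Claim_ definition above) =====
theorem is_section_reset_py_spec : Claim_equal_is_section_reset_py := by
  intro t _
  unfold Spec_is_section_reset_py is_section_reset_py is_section_reset_py_alt
  rw [setsB_eq]
  by_cases h0 : t == ""
  · simp [h0]
  · by_cases hc1 : sectionResets.contains t = true
    · have hm1 : t ∈ sectionResets := by simpa using hc1
      split_ifs; simp_all
    · by_cases hc2 : sectionResets.contains (rstripS t) = true
      · have hm2 : rstripS t ∈ sectionResets := by simpa using hc2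
        split_ifs; simp_all
      · simp only [h0, Bool.false_eq_true, if_false, if_neg hc1, if_neg hc2]
        by_cases h : PySem.Str.len t > 60
        · simp only [if_pos h]
        · simp only [if_neg h]
          rw [Bool.eq_iff_iff, any_startswith_iff, scanPrefix_iff]
          simp
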